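-- pv_equiv track=rewrite | github.com/SlimTekDev/ProxyForge | scripts/opr/fetch_opr_json.py | generic_name_to_group
-- ===== SOURCE A (Python) =====
-- def generic_name_to_group(generic_name):
--     """Map genericName to Army Forge-style group (Heroes, Core, Special, Support, Vehicles & Monsters)."""
--     if not generic_name or not isinstance(generic_name, str):
--         return "Other"
--     g = generic_name.strip().lower()
--     if "hero" in g:
--         return "Heroes"
--     if "titan" in g or ("great" in g and "monster" in g):
--         return "Vehicles & Monsters"
--     if any(x in g for x in ("monster", "vehicle", "tank", "walker", "gunship", "speeder", "chariot", "drop pod", "artillery beast", "brute giant")):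
--         return "Vehicles & Monsters"
--     if "artillery" in g or "support " in g or "altar" in g:
--         return "Support"
--     # Core: basic troops (exclude elite/heavy/assault/support/veteran/psychic/flying variants)
--     non_core = ("elite", "heavy", "assault", "support", "veteran", "psychic", "flying", "shield", "brute")
--     if any(x in g for x in ("light infantry", "scouts", "fanatics", "swarms")):
--         if not any(x in g for x in non_core):
--             return "Core"
--     if g == "infantry" or g == "bikers":
--         return "Core"
--     if "infantry" in g or "bikers" in g:
--         if not any(x in g for x in non_core):
--             return "Core"
--     return "Special"
-- ===== SOURCE B (Python) =====
-- # B: instead of per-keyword substring searches, one left-to-right scan over the string's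
-- # positions collects the set of keywords that occur anywhere (a naive multi-pattern matcher);
-- # a pure decision function over that feature set (set intersections/subset tests) picks the label.
--
-- _KEYWORDS = [
--     "hero", "titan", "great", "monster", "vehicle", "tank", "walker", "gunship",
--     "speeder", "chariot", "drop pod", "artillery beast", "brute giant",
--     "artillery", "support ", "altar",
--     "light infantry", "scouts", "fanatics", "swarms", "infantry", "bikers",
--     "elite", "heavy", "assault", "support", "veteran", "psychic", "flying",
--     "shield", "brute",
-- ]
--
-- _VM = {"monster", "vehicle", "tank", "walker", "gunship", "speeder", "chariot",
--        "drop pod", "artillery beast", "brute giant"}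
-- _SUPPORT = {"artillery", "support ", "altar"}
-- _CORE_SPECIALS = {"light infantry", "scouts", "fanatics", "swarms"}
-- _CORE_BASE = {"infantry", "bikers"}
-- _NON_CORE = {"elite", "heavy", "assault", "support", "veteran", "psychic", "flying",
--              "shield", "brute"}
--
--
-- def _decide(g, f):
--     if "hero" in f:
--         return "Heroes"
--     if "titan" in f or {"great", "monster"} <= f:
--         return "Vehicles & Monsters"
--     if f & _VM:
--         return "Vehicles & Monsters"
--     if f & _SUPPORT:
--         return "Support"
--     clean = not (f & _NON_CORE)
--     if f & _CORE_SPECIALS and clean: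
--         return "Core"
--     if g in ("infantry", "bikers"):
--         return "Core"
--     if f & _CORE_BASE and clean:
--         return "Core"
--     return "Special"
--
--
-- def generic_name_to_group(generic_name):
--     """Map genericName to Army Forge-style group (Heroes, Core, Special, Support, Vehicles & Monsters)."""
--     if not generic_name or not isinstance(generic_name, str):
--         return "Other"
--     g = generic_name.strip().lower()
--     found = set()
--     for i in range(len(g)):
--         for w in _KEYWORDS:
--             if g.startswith(w, i):
--                 found.add(w)
--     return _decide(g, found)
-- ===== Notes on version B (the rewrite author's own statement) =====
-- stated objective: alternative
-- what changed: A runs a per-keyword substring search in an if-ladder; B makes one left-to-right scan over the string's positions collecting the set of keywords that occur anywhere (a naive multi-pattern matcher) and then decides the label by pure set operations (membership, subset, intersection) on that feature set.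
import Mathlib
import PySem

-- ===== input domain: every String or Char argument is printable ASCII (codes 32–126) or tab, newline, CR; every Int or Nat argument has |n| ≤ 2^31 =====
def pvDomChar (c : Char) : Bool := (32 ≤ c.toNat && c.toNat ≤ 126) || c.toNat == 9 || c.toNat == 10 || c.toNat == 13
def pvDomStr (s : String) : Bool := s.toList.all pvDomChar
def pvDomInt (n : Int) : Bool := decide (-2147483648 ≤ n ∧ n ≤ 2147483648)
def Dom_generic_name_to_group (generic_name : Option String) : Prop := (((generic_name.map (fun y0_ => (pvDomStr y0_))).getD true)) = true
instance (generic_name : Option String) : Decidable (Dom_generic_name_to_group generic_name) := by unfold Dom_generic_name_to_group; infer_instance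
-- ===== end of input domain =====

-- B replaces A's per-keyword substring searches by one scan over the string's positions that
-- collects the set of keywords occurring anywhere, then a pure decision over that feature set;
-- objective: alternative.

-- ===== PORT A =====
def generic_name_to_group (generic_name : Option String) : String :=
  match generic_name with
  | none => "Other"
  | some s =>
    if s = "" then "Other"
    else
      let g := PySem.Str.lower (PySem.Str.strip s)
      if PySem.Str.isIn "hero" g then "Heroes"
      else if PySem.Str.isIn "titan" g ||
              (PySem.Str.isIn "great" g && PySem.Str.isIn "monster" g) then "Vehicles & Monsters"
      else if (["monster", "vehicle", "tank", "walker", "gunship", "speeder", "chariot",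
                "drop pod", "artillery beast", "brute giant"]).any
               (fun x => PySem.Str.isIn x g) then "Vehicles & Monsters"
      else if PySem.Str.isIn "artillery" g || PySem.Str.isIn "support " g ||
              PySem.Str.isIn "altar" g then "Support"
      else if (["light infantry", "scouts", "fanatics", "swarms"]).any
                (fun x => PySem.Str.isIn x g) &&
              !((["elite", "heavy", "assault", "support", "veteran", "psychic", "flying",
                  "shield", "brute"]).any (fun x => PySem.Str.isIn x g)) then "Core"
      else if g == "infantry" || g == "bikers" then "Core"
      else if (PySem.Str.isIn "infantry" g || PySem.Str.isIn "bikers" g) &&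
              !((["elite", "heavy", "assault", "support", "veteran", "psychic", "flying",
                  "shield", "brute"]).any (fun x => PySem.Str.isIn x g)) then "Core"
      else "Special"

-- ===== PORT B =====
def gntgKeywords : List String :=
  ["hero", "titan", "great", "monster", "vehicle", "tank", "walker", "gunship",
   "speeder", "chariot", "drop pod", "artillery beast", "brute giant",
   "artillery", "support ", "altar",
   "light infantry", "scouts", "fanatics", "swarms", "infantry", "bikers",
   "elite", "heavy", "assault", "support", "veteran", "psychic", "flying",
   "shield", "brute"]

def gntgVM : PySem.Set String :=
  PySem.Set.ofList ["monster", "vehicle", "tank", "walker", "gunship", "speeder", "chariot",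
                    "drop pod", "artillery beast", "brute giant"]
def gntgSupportWs : PySem.Set String := PySem.Set.ofList ["artillery", "support ", "altar"]
def gntgCoreSpecials : PySem.Set String :=
  PySem.Set.ofList ["light infantry", "scouts", "fanatics", "swarms"]
def gntgCoreBase : PySem.Set String := PySem.Set.ofList ["infantry", "bikers"]
def gntgNonCore : PySem.Set String :=
  PySem.Set.ofList ["elite", "heavy", "assault", "support", "veteran", "psychic", "flying",
                    "shield", "brute"]

-- found = { w in _KEYWORDS | g.startswith(w, i) for some i in range(len(g)) };
-- g.startswith(w, i) with 0 ≤ i ≤ len(g) is exactly 'w.toList is a prefix of g.drop i'.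
def gntgFound (g : List Char) : PySem.Set String :=
  (List.range g.length).foldl
    (fun f i => gntgKeywords.foldl
      (fun f w => if PySem.Chars.startswith (g.drop i) w.toList then PySem.Set.add f w else f) f)
    PySem.Set.empty

def gntgDecide (g : String) (f : PySem.Set String) : String :=
  if PySem.Set.contains f "hero" then "Heroes"
  else if PySem.Set.contains f "titan" ||
          PySem.Set.issubset (PySem.Set.ofList ["great", "monster"]) f then "Vehicles & Monsters"
  else if !(PySem.Set.inter f gntgVM).isEmpty then "Vehicles & Monsters"
  else if !(PySem.Set.inter f gntgSupportWs).isEmpty then "Support"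
  else
    let clean := (PySem.Set.inter f gntgNonCore).isEmpty
    if !(PySem.Set.inter f gntgCoreSpecials).isEmpty && clean then "Core"
    else if g == "infantry" || g == "bikers" then "Core"
    else if !(PySem.Set.inter f gntgCoreBase).isEmpty && clean then "Core"
    else "Special"

def generic_name_to_group_alt (generic_name : Option String) : String :=
  match generic_name with
  | none => "Other"
  | some s =>
    if s = "" then "Other"
    else
      let g := PySem.Str.lower (PySem.Str.strip s)
      gntgDecide g (gntgFound g.toList)

-- ===== PRECONDITION & SPEC =====
def Spec_generic_name_to_group (generic_name : Option String) (out : String) : Prop := out = generic_name_to_group_alt generic_name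
instance (generic_name : Option String) (out : String) : Decidable (Spec_generic_name_to_group generic_name out) := by unfold Spec_generic_name_to_group; infer_instance

-- ===== CLAIM (what is proved, stated in full; the proofs are below) =====
def Claim_equal_generic_name_to_group : Prop := ∀ (generic_name : Option String), Dom_generic_name_to_group generic_name → Spec_generic_name_to_group generic_name (generic_name_to_group generic_name)

-- ===== LEMMAS AND PROOFS =====

theorem gntg_mem_inner (ws : List String) (q : String → Bool) (a : PySem.Set String) (w : String) :
    w ∈ ws.foldl (fun f u => if q u then PySem.Set.add f u else f) a
      ↔ w ∈ a ∨ (w ∈ ws ∧ q w = true) := by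
  induction ws generalizing a with
  | nil => simp
  | cons u ws ih =>
    simp only [List.foldl_cons, ih]
    by_cases hq : q u = true
    · by_cases hw : w = u <;> simp [hq, hw, PySem.Set.mem_add]
    · by_cases hw : w = u <;> simp [hq, hw]

theorem gntg_mem_outer (is : List Nat) (g : List Char) (a : PySem.Set String) (w : String) :
    w ∈ is.foldl
          (fun f i => gntgKeywords.foldl
            (fun f u => if PySem.Chars.startswith (g.drop i) u.toList then PySem.Set.add f u else f) f)
          a
      ↔ w ∈ a ∨ (w ∈ gntgKeywords ∧ ∃ i ∈ is, PySem.Chars.startswith (g.drop i) w.toList = true) := by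
  induction is generalizing a with
  | nil => simp
  | cons i is ih =>
    simp only [List.foldl_cons, ih, gntg_mem_inner, List.mem_cons, or_and_right, exists_or,
      exists_eq_left]
    tauto

theorem gntg_exists_startswith (g wl : List Char) (hw : wl ≠ []) :
    (∃ i ∈ List.range g.length, PySem.Chars.startswith (g.drop i) wl = true)
      ↔ PySem.Chars.isIn wl g = true := by
  rw [← PySem.Chars.exists_prefix_drop_iff_isIn]
  constructor
  · rintro ⟨i, _, h⟩
    exact ⟨i, (PySem.Chars.startswith_iff _ _).mp h⟩
  · rintro ⟨j, h⟩
    by_cases hj : j < g.length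
    · exact ⟨j, List.mem_range.mpr hj, (PySem.Chars.startswith_iff _ _).mpr h⟩
    · exact absurd (List.prefix_nil.mp (List.drop_eq_nil_of_le (le_of_not_gt hj) ▸ h)) hw

theorem gntg_mem_found (g : List Char) (w : String) (hw : w.toList ≠ []) :
    w ∈ gntgFound g ↔ w ∈ gntgKeywords ∧ PySem.Chars.isIn w.toList g = true := by
  unfold gntgFound
  rw [gntg_mem_outer, gntg_exists_startswith g w.toList hw]
  simp [PySem.Set.empty]

theorem gntg_contains_found (g : List Char) (w : String) (hk : w ∈ gntgKeywords)
    (hw : w.toList ≠ []) :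
    PySem.Set.contains (gntgFound g) w = PySem.Chars.isIn w.toList g := by
  rw [Bool.eq_iff_iff, PySem.Set.contains_iff, gntg_mem_found g w hw]
  simp [hk]

theorem gntg_inter_found (g : List Char) (t : List String)
    (hk : ∀ w ∈ t, w ∈ gntgKeywords ∧ w.toList ≠ []) :
    (!(PySem.Set.inter (gntgFound g) t).isEmpty)
      = t.any (fun w => PySem.Chars.isIn w.toList g) := by
  rw [Bool.eq_iff_iff]
  simp only [Bool.not_eq_true', List.isEmpty_eq_false_iff_exists_mem, List.any_eq_true]
  constructor
  · rintro ⟨w, hw⟩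
    have hm := (PySem.Set.mem_inter _ _ _).mp hw
    exact ⟨w, hm.2, ((gntg_mem_found g w (hk w hm.2).2).mp hm.1).2⟩
  · rintro ⟨w, hwt, hin⟩
    exact ⟨w, (PySem.Set.mem_inter _ _ _).mpr
      ⟨(gntg_mem_found g w (hk w hwt).2).mpr ⟨(hk w hwt).1, hin⟩, hwt⟩⟩

theorem gntg_body_eq (g : String) :
    gntgDecide g (gntgFound g.toList)
      = (if PySem.Str.isIn "hero" g then "Heroes"
      else if PySem.Str.isIn "titan" g ||
              (PySem.Str.isIn "great" g && PySem.Str.isIn "monster" g) then "Vehicles & Monsters"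
      else if (["monster", "vehicle", "tank", "walker", "gunship", "speeder", "chariot",
                "drop pod", "artillery beast", "brute giant"]).any
               (fun x => PySem.Str.isIn x g) then "Vehicles & Monsters"
      else if PySem.Str.isIn "artillery" g || PySem.Str.isIn "support " g ||
              PySem.Str.isIn "altar" g then "Support"
      else if (["light infantry", "scouts", "fanatics", "swarms"]).any
                (fun x => PySem.Str.isIn x g) &&
              !((["elite", "heavy", "assault", "support", "veteran", "psychic", "flying",
                  "shield", "brute"]).any (fun x => PySem.Str.isIn x g)) then "Core"
      else if g == "infantry" || g == "bikers" then "Core"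
      else if (PySem.Str.isIn "infantry" g || PySem.Str.isIn "bikers" g) &&
              !((["elite", "heavy", "assault", "support", "veteran", "psychic", "flying",
                  "shield", "brute"]).any (fun x => PySem.Str.isIn x g)) then "Core"
      else "Special") := by
  have hsub : PySem.Set.issubset (PySem.Set.ofList ["great", "monster"]) (gntgFound g.toList)
      = (PySem.Chars.isIn "great".toList g.toList && PySem.Chars.isIn "monster".toList g.toList) := by
    rw [Bool.eq_iff_iff, PySem.Set.issubset_iff]
    simp only [PySem.Set.mem_ofList, Bool.and_eq_true]
    constructor
    · intro h
      exact ⟨((gntg_mem_found _ _ (by decide)).mp (h "great" (by simp))).2,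
             ((gntg_mem_found _ _ (by decide)).mp (h "monster" (by simp))).2⟩
    · rintro ⟨h1, h2⟩ x hx
      rcases (by simpa using hx : x = "great" ∨ x = "monster") with rfl | rfl
      · exact (gntg_mem_found _ _ (by decide)).mpr ⟨by decide, h1⟩
      · exact (gntg_mem_found _ _ (by decide)).mpr ⟨by decide, h2⟩
  unfold gntgDecide
  rw [gntg_contains_found _ _ (by decide) (by decide),
      gntg_contains_found _ _ (by decide) (by decide), hsub,
      gntg_inter_found _ gntgVM (by decide),
      gntg_inter_found _ gntgSupportWs (by decide),
      gntg_inter_found _ gntgCoreSpecials (by decide),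
      gntg_inter_found _ gntgCoreBase (by decide)]
  have hnc : (PySem.Set.inter (gntgFound g.toList) gntgNonCore).isEmpty
      = !(gntgNonCore.any (fun w => PySem.Chars.isIn w.toList g.toList)) := by
    rw [← gntg_inter_found _ gntgNonCore (by decide), Bool.not_not]
  rw [hnc]
  have eVM : gntgVM = ["monster", "vehicle", "tank", "walker", "gunship", "speeder", "chariot",
      "drop pod", "artillery beast", "brute giant"] := by decide
  have eSup : gntgSupportWs = ["artillery", "support ", "altar"] := by decide
  have eCS : gntgCoreSpecials = ["light infantry", "scouts", "fanatics", "swarms"] := by decide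
  have eCB : gntgCoreBase = ["infantry", "bikers"] := by decide
  have eNC : gntgNonCore = ["elite", "heavy", "assault", "support", "veteran", "psychic",
      "flying", "shield", "brute"] := by decide
  simp only [eVM, eSup, eCS, eCB, eNC, PySem.Str.isIn_eq, List.any_cons, List.any_nil,
    Bool.or_false, Bool.or_assoc]

-- ===== VERDICT (by name: the statement is the Claim_ definition above) =====
theorem generic_name_to_group_spec : Claim_equal_generic_name_to_group := by
  intro x _
  unfold Spec_generic_name_to_group generic_name_to_group generic_name_to_group_alt
  match x with
  | none => rfl
  | some s =>
    by_cases h : s = ""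
    · simp [h]
    · simp only [if_neg h]
      exact (gntg_body_eq _).symm
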